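-- pv_equiv track=rewrite | github.com/angelfaceless/KawaiiTrader | cli/kawaii_cli.py | normalize_timeframe
-- ===== SOURCE A (Python) =====
-- def normalize_timeframe(tf: str) -> str:
--     """Normalize user input timeframes like 5m, 1hr to system format."""
--     tf = tf.lower().replace(" ", "")
--     replacements = {
--         "m": "min",
--         "hr": "h",
--         "h": "h",
--         "d": "d"
--     }
--
--     for key, val in replacements.items():
--         if tf.endswith(key):
--             number = tf[:-len(key)]
--             if number.isdigit():
--                 return f"{number}{val}"
--     return tf
-- ===== SOURCE B (Python) =====
-- def normalize_timeframe(tf: str) -> str: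
--     """Normalize user input timeframes like 5m, 1hr to system format."""
--     tf = tf.lower().replace(" ", "")
--     units = {"m": "min", "hr": "h", "h": "h", "d": "d"}
--     i = 0
--     while i < len(tf) and tf[i].isdigit():
--         i += 1
--     number, unit = tf[:i], tf[i:]
--     if number and unit in units:
--         return number + units[unit]
--     return tf
-- ===== Notes on version B (the rewrite author's own statement) =====
-- stated objective: simpler
-- what changed: Replaces A's loop over candidate suffix keys (endswith + per-key digit test on a slice) by a single digit-prefix scan that splits the string into number/unit once, followed by one dict lookup of the unit.
import Mathlib
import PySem

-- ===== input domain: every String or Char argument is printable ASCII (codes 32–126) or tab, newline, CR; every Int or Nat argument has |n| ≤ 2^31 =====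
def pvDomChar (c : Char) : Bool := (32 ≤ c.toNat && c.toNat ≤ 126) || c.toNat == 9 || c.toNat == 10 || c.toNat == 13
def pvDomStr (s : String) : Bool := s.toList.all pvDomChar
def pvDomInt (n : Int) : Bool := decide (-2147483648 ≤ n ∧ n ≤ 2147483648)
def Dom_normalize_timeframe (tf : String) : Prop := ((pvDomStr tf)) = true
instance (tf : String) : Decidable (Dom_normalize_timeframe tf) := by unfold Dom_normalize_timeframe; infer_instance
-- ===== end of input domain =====

-- B replaces A's loop over candidate suffixes (endswith + digit test per key) by one
-- digit-prefix scan and a single unit lookup; objective: simpler, same return value.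

-- ===== PORT A =====
-- the 'for key, val in replacements.items()' loop: try each (key, val) in order
def nt_loop (tf : List Char) : List (List Char × List Char) → List Char
  | [] => tf
  | (key, val) :: rest =>
    if PySem.Chars.endswith tf key then
      let number := PySem.Chars.slice tf none (some (-(key.length : Int)))   -- tf[:-len(key)]
      if PySem.Chars.strIsdigit number then number ++ val
      else nt_loop tf rest
    else nt_loop tf rest

def normalize_timeframe (tf : String) : String :=
  let tfc := PySem.Chars.replace (PySem.Chars.lower tf.toList) [' '] []
  String.ofList (nt_loop tfc
    [(['m'], ['m','i','n']), (['h','r'], ['h']), (['h'], ['h']), (['d'], ['d'])])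

-- ===== PORT B =====
def nt_units : PySem.Dict (List Char) (List Char) :=
  PySem.Dict.ofList [(['m'], ['m','i','n']), (['h','r'], ['h']), (['h'], ['h']), (['d'], ['d'])]

-- split tfc at the first non-digit position: number = digit prefix, unit = the rest
def nt_core (tfc : List Char) : List Char :=
  let number := tfc.takeWhile PySem.Chars.isdigit
  let unit := tfc.dropWhile PySem.Chars.isdigit
  match number, PySem.Dict.get? nt_units unit with
  | _ :: _, some v => number ++ v
  | _, _ => tfc

def normalize_timeframe_alt (tf : String) : String :=
  let tfc := PySem.Chars.replace (PySem.Chars.lower tf.toList) [' '] []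
  String.ofList (nt_core tfc)

-- ===== PRECONDITION & SPEC =====
def Spec_normalize_timeframe (tf : String) (out : String) : Prop := out = normalize_timeframe_alt tf
instance (tf : String) (out : String) : Decidable (Spec_normalize_timeframe tf out) := by unfold Spec_normalize_timeframe; infer_instance

-- ===== CLAIM (what is proved, stated in full; the proofs are below) =====
def Claim_equal_normalize_timeframe : Prop := ∀ (tf : String), Dom_normalize_timeframe tf → Spec_normalize_timeframe tf (normalize_timeframe tf)

-- ===== LEMMAS AND PROOFS =====

-- tf[:-m] as a take
theorem slice_neg_len (l : List Char) (m : Nat) (hm : 0 < m) (h : m ≤ l.length) :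
    PySem.List.slice l none (some (-(m : Int))) = l.take (l.length - m) := by
  simp only [PySem.List.slice, PySem.List.clampIdx]
  rw [if_pos (by omega), if_neg (by omega)]
  simp
  omega

-- when the digit-prefix split of l is (prefix, c :: k), A's slice tf[:-len(key)] IS that prefix
theorem sliceA_eq (l : List Char) (c : Char) (k : List Char)
    (h : l.dropWhile PySem.Chars.isdigit = c :: k) :
    PySem.Chars.slice l none (some (-((c :: k).length : Int))) =
      l.takeWhile PySem.Chars.isdigit := by
  have hl : l.takeWhile PySem.Chars.isdigit ++ (c :: k) = l := by
    rw [← h]; exact List.takeWhile_append_dropWhile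
  rw [PySem.Chars.slice_eq_listSlice,
    slice_neg_len l (c :: k).length (by simp) (by rw [← hl]; simp)]
  conv_lhs => rw [← hl]
  simp

-- A's test for a key c :: k whose first char is not a digit succeeds exactly when the
-- digit-prefix split of l is (nonempty digit prefix, exactly c :: k)
theorem testA_iff (l : List Char) (c : Char) (k : List Char)
    (hc : PySem.Chars.isdigit c = false) :
    (PySem.Chars.endswith l (c :: k) = true ∧
      PySem.Chars.strIsdigit
        (PySem.Chars.slice l none (some (-((c :: k).length : Int)))) = true)
    ↔ (l.dropWhile PySem.Chars.isdigit = c :: k ∧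
        l.takeWhile PySem.Chars.isdigit ≠ []) := by
  constructor
  · rintro ⟨he, hd⟩
    rw [PySem.Chars.endswith_iff] at he
    obtain ⟨p, hp⟩ := he
    subst hp
    have hslice : PySem.Chars.slice (p ++ c :: k) none (some (-((c :: k).length : Int))) = p := by
      rw [PySem.Chars.slice_eq_listSlice,
        slice_neg_len _ (c :: k).length (by simp) (by simp)]
      simp
    rw [hslice] at hd
    simp only [PySem.Chars.strIsdigit, Bool.and_eq_true, Bool.not_eq_true',
      List.isEmpty_eq_false_iff] at hd
    obtain ⟨hpne, hpall⟩ := hd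
    have ht : (p ++ c :: k).takeWhile PySem.Chars.isdigit = p := by
      rw [List.takeWhile_append]
      simp_all
    have hdd : (p ++ c :: k).dropWhile PySem.Chars.isdigit = c :: k := by
      rw [List.dropWhile_append]
      simp_all
    exact ⟨hdd, by rw [ht]; exact hpne⟩
  · rintro ⟨hu, hn⟩
    have hl : l.takeWhile PySem.Chars.isdigit ++ (c :: k) = l := by
      rw [← hu]; exact List.takeWhile_append_dropWhile
    refine ⟨?_, ?_⟩
    · rw [PySem.Chars.endswith_iff]
      exact ⟨_, hl⟩
    · rw [sliceA_eq l c k hu]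
      simp only [PySem.Chars.strIsdigit, Bool.and_eq_true, Bool.not_eq_true',
        List.isEmpty_eq_false_iff]
      exact ⟨hn, List.all_takeWhile⟩

theorem nt_step_yes (l key val : List Char) (rest : List (List Char × List Char))
    (he : PySem.Chars.endswith l key = true)
    (hd : PySem.Chars.strIsdigit (PySem.Chars.slice l none (some (-(key.length : Int)))) = true) :
    nt_loop l ((key, val) :: rest) =
      PySem.Chars.slice l none (some (-(key.length : Int))) ++ val := by
  simp only [nt_loop]
  rw [if_pos he, if_pos hd]

theorem nt_step_no (l key val : List Char) (rest : List (List Char × List Char))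
    (h : ¬ (PySem.Chars.endswith l key = true ∧
      PySem.Chars.strIsdigit (PySem.Chars.slice l none (some (-(key.length : Int)))) = true)) :
    nt_loop l ((key, val) :: rest) = nt_loop l rest := by
  simp only [nt_loop]
  split_ifs with h1 h2 <;> first | rfl | exact absurd ⟨h1, h2⟩ h

-- B-side evaluation lemmas
theorem nt_core_hit (l : List Char) (v : List Char)
    (h1 : l.takeWhile PySem.Chars.isdigit ≠ [])
    (h2 : PySem.Dict.get? nt_units (l.dropWhile PySem.Chars.isdigit) = some v) :
    nt_core l = l.takeWhile PySem.Chars.isdigit ++ v := by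
  unfold nt_core
  cases htw : l.takeWhile PySem.Chars.isdigit with
  | nil => exact absurd htw h1
  | cons a as =>
    simp only [h2]

theorem nt_core_miss (l : List Char)
    (h : l.takeWhile PySem.Chars.isdigit = [] ∨
      PySem.Dict.get? nt_units (l.dropWhile PySem.Chars.isdigit) = none) :
    nt_core l = l := by
  unfold nt_core
  cases htw : l.takeWhile PySem.Chars.isdigit with
  | nil => rfl
  | cons a as =>
    rcases h with h | h
    · simp [htw] at h
    · simp only [h]

-- the heart: on any char list, A's loop equals B's split-and-lookup
theorem core_eq (l : List Char) :
    nt_loop l [(['m'], ['m','i','n']), (['h','r'], ['h']), (['h'], ['h']), (['d'], ['d'])]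
      = nt_core l := by
  by_cases hn : l.takeWhile PySem.Chars.isdigit = []
  · rw [nt_step_no l ['m'] _ _ (fun h => (((testA_iff l 'm' [] (by decide)).mp h).2) hn),
      nt_step_no l ['h','r'] _ _ (fun h => (((testA_iff l 'h' ['r'] (by decide)).mp h).2) hn),
      nt_step_no l ['h'] _ _ (fun h => (((testA_iff l 'h' [] (by decide)).mp h).2) hn),
      nt_step_no l ['d'] _ _ (fun h => (((testA_iff l 'd' [] (by decide)).mp h).2) hn),
      nt_core_miss l (Or.inl hn)]
    rfl
  · cases hu : l.dropWhile PySem.Chars.isdigit with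
    | nil =>
      rw [nt_step_no l ['m'] _ _ (fun h => absurd (hu ▸ ((testA_iff l 'm' [] (by decide)).mp h).1) (by decide)),
        nt_step_no l ['h','r'] _ _ (fun h => absurd (hu ▸ ((testA_iff l 'h' ['r'] (by decide)).mp h).1) (by decide)),
        nt_step_no l ['h'] _ _ (fun h => absurd (hu ▸ ((testA_iff l 'h' [] (by decide)).mp h).1) (by decide)),
        nt_step_no l ['d'] _ _ (fun h => absurd (hu ▸ ((testA_iff l 'd' [] (by decide)).mp h).1) (by decide)),
        nt_core_miss l (Or.inr (by rw [hu]; decide))]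
      rfl
    | cons c u' =>
      by_cases hm : c :: u' = ['m']
      · rw [hm] at hu
        obtain ⟨he, hd⟩ := (testA_iff l 'm' [] (by decide)).mpr ⟨hu, hn⟩
        rw [nt_step_yes l _ _ _ he hd, sliceA_eq l 'm' [] hu,
          nt_core_hit l ['m','i','n'] hn (by rw [hu]; decide)]
      · by_cases hhr : c :: u' = ['h','r']
        · rw [hhr] at hu
          obtain ⟨he, hd⟩ := (testA_iff l 'h' ['r'] (by decide)).mpr ⟨hu, hn⟩
          rw [nt_step_no l ['m'] _ _ (fun h => absurd (hu ▸ ((testA_iff l 'm' [] (by decide)).mp h).1) (by decide)),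
            nt_step_yes l _ _ _ he hd, sliceA_eq l 'h' ['r'] hu,
            nt_core_hit l ['h'] hn (by rw [hu]; decide)]
        · by_cases hh : c :: u' = ['h']
          · rw [hh] at hu
            obtain ⟨he, hd⟩ := (testA_iff l 'h' [] (by decide)).mpr ⟨hu, hn⟩
            rw [nt_step_no l ['m'] _ _ (fun h => absurd (hu ▸ ((testA_iff l 'm' [] (by decide)).mp h).1) (by decide)),
              nt_step_no l ['h','r'] _ _ (fun h => absurd (hu ▸ ((testA_iff l 'h' ['r'] (by decide)).mp h).1) (by decide)),
              nt_step_yes l _ _ _ he hd, sliceA_eq l 'h' [] hu,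
              nt_core_hit l ['h'] hn (by rw [hu]; decide)]
          · by_cases hd' : c :: u' = ['d']
            · rw [hd'] at hu
              obtain ⟨he, hd⟩ := (testA_iff l 'd' [] (by decide)).mpr ⟨hu, hn⟩
              rw [nt_step_no l ['m'] _ _ (fun h => absurd (hu ▸ ((testA_iff l 'm' [] (by decide)).mp h).1) (by decide)),
                nt_step_no l ['h','r'] _ _ (fun h => absurd (hu ▸ ((testA_iff l 'h' ['r'] (by decide)).mp h).1) (by decide)),
                nt_step_no l ['h'] _ _ (fun h => absurd (hu ▸ ((testA_iff l 'h' [] (by decide)).mp h).1) (by decide)),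
                nt_step_yes l _ _ _ he hd, sliceA_eq l 'd' [] hu,
                nt_core_hit l ['d'] hn (by rw [hu]; decide)]
            · -- the unit part is not one of the four keys: every test fails, both return l
              have hget : PySem.Dict.get? nt_units (c :: u') = none := by
                have hit : nt_units.items = [(['m'], ['m','i','n']), (['h','r'], ['h']), (['h'], ['h']), (['d'], ['d'])] := by decide
                have e1 : ((['m'] : List Char) == c :: u') = false := beq_eq_false_iff_ne.mpr (Ne.symm hm)
                have e2 : ((['h','r'] : List Char) == c :: u') = false := beq_eq_false_iff_ne.mpr (Ne.symm hhr)
                have e3 : ((['h'] : List Char) == c :: u') = false := beq_eq_false_iff_ne.mpr (Ne.symm hh)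
                have e4 : ((['d'] : List Char) == c :: u') = false := beq_eq_false_iff_ne.mpr (Ne.symm hd')
                simp [PySem.Dict.get?, hit, List.find?, e1, e2, e3, e4]
              rw [nt_step_no l ['m'] _ _ (fun h => hm (hu ▸ ((testA_iff l 'm' [] (by decide)).mp h).1)),
                nt_step_no l ['h','r'] _ _ (fun h => hhr (hu ▸ ((testA_iff l 'h' ['r'] (by decide)).mp h).1)),
                nt_step_no l ['h'] _ _ (fun h => hh (hu ▸ ((testA_iff l 'h' [] (by decide)).mp h).1)),
                nt_step_no l ['d'] _ _ (fun h => hd' (hu ▸ ((testA_iff l 'd' [] (by decide)).mp h).1)),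
                nt_core_miss l (Or.inr (by rw [hu]; exact hget))]
              rfl

-- ===== VERDICT (by name: the statement is the Claim_ definition above) =====
theorem normalize_timeframe_spec : Claim_equal_normalize_timeframe := by
  intro tf _
  unfold Spec_normalize_timeframe normalize_timeframe normalize_timeframe_alt
  exact congrArg String.ofList (core_eq _)
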